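-- pv_equiv track=rewrite | github.com/lilyang1989/semantic- | network_constructor.py | find_nodes_with_min_degree
-- ===== SOURCE A (Python) =====
-- def find_nodes_with_min_degree(graph):
--     min_degree = float('inf')
--     min_degree_nodes = []
--     for node in graph:
--         out_degree = len(graph[node])
--         in_degree = 0
--         for other_node in graph:
--             if node in graph[other_node]:
--                 in_degree += 1
--         degree = out_degree + in_degree
--         if degree < min_degree:
--             min_degree = degree
--             min_degree_nodes = [node]
--         elif degree == min_degree:
--             min_degree_nodes.append(node)
--     return min_degree_nodes
-- ===== SOURCE B (Python) =====
-- def find_nodes_with_min_degree(graph):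
--     # Precompute in-degrees once, then a min scan + filter: O(V+E) instead of A's O(V^2) nested membership scans.
--     indeg = {}
--     for k in graph:
--         for v in set(graph[k]):
--             indeg[v] = indeg.get(v, 0) + 1
--     if not graph:
--         return []
--     m = min(len(graph[n]) + indeg.get(n, 0) for n in graph)
--     return [n for n in graph if len(graph[n]) + indeg.get(n, 0) == m]
-- ===== Notes on version B (the rewrite author's own statement) =====
-- stated objective: faster
-- what changed: Replaced the per-node inner scan over all nodes (membership test in each adjacency list) by one precomputed in-degree counter built in a single pass over the adjacency lists, followed by a min computation and a filter instead of A's running-minimum collect loop.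
import Mathlib
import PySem

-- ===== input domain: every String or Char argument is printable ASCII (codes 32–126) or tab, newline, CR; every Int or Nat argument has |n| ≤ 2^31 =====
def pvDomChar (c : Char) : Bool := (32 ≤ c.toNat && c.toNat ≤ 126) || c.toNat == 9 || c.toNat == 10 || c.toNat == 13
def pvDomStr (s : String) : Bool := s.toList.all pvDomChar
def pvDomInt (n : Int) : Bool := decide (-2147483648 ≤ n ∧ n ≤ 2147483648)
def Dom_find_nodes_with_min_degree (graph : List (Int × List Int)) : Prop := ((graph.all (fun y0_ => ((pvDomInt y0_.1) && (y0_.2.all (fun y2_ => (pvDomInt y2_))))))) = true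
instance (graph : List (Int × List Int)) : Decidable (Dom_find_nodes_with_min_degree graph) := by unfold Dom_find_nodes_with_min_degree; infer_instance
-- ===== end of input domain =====

-- B replaces A's per-node inner scan by one precomputed in-degree counter plus a min+filter pass (faster).

-- graph[n]: first-match association-list lookup (the dict lookup; keys iterated below come from the dict itself, so the key is present)
def pvLookup (g : List (Int × List Int)) (n : Int) : List Int :=
  ((g.find? (fun kv => kv.1 == n)).map Prod.snd).getD []

-- ===== PORT A =====
-- literal transliteration: outer loop carries (min_degree : Option Int — 'none' plays float('inf'), min_degree_nodes)
def find_nodes_with_min_degree (graph : List (Int × List Int)) : List Int :=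
  (graph.foldl (fun (st : Option Int × List Int) kv =>
      let node := kv.1
      let out_degree : Int := (pvLookup graph node).length
      let in_degree : Int := graph.foldl
        (fun c kv2 => if node ∈ pvLookup graph kv2.1 then c + 1 else c) 0
      let degree := out_degree + in_degree
      match st.1 with
      | none => (some degree, [node])
      | some m =>
        if degree < m then (some degree, [node])
        else if degree = m then (some m, st.2 ++ [node])
        else st) (none, [])).2

-- ===== PORT B =====
def find_nodes_with_min_degree_alt (graph : List (Int × List Int)) : List Int :=
  let indeg : PySem.Dict Int Int := graph.foldl (fun d kv =>
      (PySem.Set.ofList (pvLookup graph kv.1)).foldl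
        (fun d v => PySem.Dict.insert d v (PySem.Dict.getD d v 0 + 1)) d) PySem.Dict.empty
  let deg : Int → Int := fun n => ((pvLookup graph n).length : Int) + PySem.Dict.getD indeg n 0
  if graph.isEmpty then []
  else
    match PySem.List.min? (graph.map (fun kv => deg kv.1)) (fun x => x) with
    | none => []
    | some m => (graph.map Prod.fst).filter (fun n => deg n == m)

-- ===== PRECONDITION & SPEC =====
def Spec_find_nodes_with_min_degree (graph : List (Int × List Int)) (out : List Int) : Prop := out = find_nodes_with_min_degree_alt graph
instance (graph : List (Int × List Int)) (out : List Int) : Decidable (Spec_find_nodes_with_min_degree graph out) := by unfold Spec_find_nodes_with_min_degree; infer_instance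

-- ===== CLAIM (what is proved, stated in full; the proofs are below) =====
def Claim_equal_find_nodes_with_min_degree : Prop := ∀ (graph : List (Int × List Int)), Dom_find_nodes_with_min_degree graph → Spec_find_nodes_with_min_degree graph (find_nodes_with_min_degree graph)

-- ===== LEMMAS AND PROOFS =====

-- counter inner pass: folding the increment over a duplicate-free list adds 1 exactly at its members
lemma getD_foldl_incr (s : List Int) (hs : s.Nodup) (d : PySem.Dict Int Int) (n : Int) :
    PySem.Dict.getD (s.foldl (fun d v => PySem.Dict.insert d v (PySem.Dict.getD d v 0 + 1)) d) n 0
      = PySem.Dict.getD d n 0 + (if n ∈ s then 1 else 0) := by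
  induction s generalizing d with
  | nil => simp
  | cons v s ih =>
    rcases List.nodup_cons.mp hs with ⟨hv, hs'⟩
    rw [List.foldl_cons, ih hs', PySem.Dict.getD_insert]
    by_cases h : n = v
    · subst h; simp [hv]
    · simp [h]

-- the whole counter build: getD of the built dict counts the adjacency lists containing n
lemma getD_indeg (graph g : List (Int × List Int)) (d : PySem.Dict Int Int) (n : Int) :
    PySem.Dict.getD (g.foldl (fun d kv =>
        (PySem.Set.ofList (pvLookup graph kv.1)).foldl
          (fun d v => PySem.Dict.insert d v (PySem.Dict.getD d v 0 + 1)) d) d) n 0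
      = PySem.Dict.getD d n 0 + (g.countP (fun kv => decide (n ∈ pvLookup graph kv.1)) : Int) := by
  induction g generalizing d with
  | nil => simp
  | cons kv g ih =>
    rw [List.foldl_cons, ih, getD_foldl_incr _ (PySem.Set.nodup_ofList _), List.countP_cons]
    by_cases h : n ∈ pvLookup graph kv.1
    · simp [h, PySem.Set.mem_ofList]; ring
    · simp [h, PySem.Set.mem_ofList]

-- min over a list extended by one element
lemma min?_append_singleton (ys : List Int) (a m : Int) (h : PySem.List.min? ys (fun x => x) = some m) :
    PySem.List.min? (ys ++ [a]) (fun x => x) = some (min m a) := by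
  cases ys with
  | nil => simp [PySem.List.min?] at h
  | cons y t =>
    rw [PySem.List.min?_id_cons] at h
    rw [List.cons_append, PySem.List.min?_id_cons, List.foldl_append]
    simp only [Option.some.injEq] at h
    simp [h]

-- A's running-minimum-collect loop equals min-then-filter, generically
lemma select_min {α β : Type} (f : α → Int) (g : α → β) (l : List α) :
    (l.foldl (fun (st : Option Int × List β) x =>
        match st.1 with
        | none => (some (f x), [g x])
        | some m =>
          if f x < m then (some (f x), [g x])
          else if f x = m then (some m, st.2 ++ [g x])
          else st) (none, []))
      = match PySem.List.min? (l.map f) (fun x => x) with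
        | none => (none, [])
        | some m => (some m, (l.filter (fun x => f x == m)).map g) := by
  induction l using List.reverseRecOn with
  | nil => simp [PySem.List.min?]
  | append_singleton l x ih =>
    rw [List.foldl_append, ih]
    cases hm : PySem.List.min? (l.map f) (fun x => x) with
    | none =>
      have hl : l = [] := List.map_eq_nil_iff.mp ((PySem.List.min?_eq_none_iff (xs := l.map f) (key := fun x => x)).mp hm)
      subst hl
      simp [PySem.List.min?]
    | some m =>
      have hmin : ∀ y ∈ l, m ≤ f y := by
        intro y hy
        exact PySem.List.min?_isMin hm (f y) (List.mem_map_of_mem hy)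
      have happ : PySem.List.min? (l.map f ++ [f x]) (fun x => x) = some (min m (f x)) :=
        min?_append_singleton _ _ _ hm
      rw [List.map_append, List.map_singleton, happ]
      simp only [List.foldl_cons, List.foldl_nil]
      by_cases h1 : f x < m
      · have hmn : min m (f x) = f x := by omega
        have hfilt : l.filter (fun y => f y == f x) = [] := by
          apply List.filter_eq_nil_iff.mpr
          intro y hy
          have := hmin y hy
          simp only [beq_iff_eq]
          omega
        simp [h1, hmn, List.filter_append, hfilt]
      · by_cases h2 : f x = m
        · have hmn : min m (f x) = m := by omega
          simp [h2, List.filter_append]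
        · have hmn : min m (f x) = m := by omega
          have hne : (f x == m) = false := by simp [h2]
          simp [h1, hmn, List.filter_append, hne]; exact h2

-- ===== VERDICT (by name: the statement is the Claim_ definition above) =====
theorem find_nodes_with_min_degree_spec : Claim_equal_find_nodes_with_min_degree := by
  intro graph _
  unfold Spec_find_nodes_with_min_degree find_nodes_with_min_degree find_nodes_with_min_degree_alt
  simp only
  rw [select_min
    (f := fun kv : Int × List Int =>
      ((pvLookup graph kv.1).length : Int)
        + graph.foldl (fun c kv2 => if kv.1 ∈ pvLookup graph kv2.1 then c + 1 else c) 0)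
    (g := Prod.fst) (l := graph)]
  have hdeg : ∀ n : Int,
      ((pvLookup graph n).length : Int)
        + graph.foldl (fun c kv2 => if n ∈ pvLookup graph kv2.1 then c + 1 else c) 0
      = ((pvLookup graph n).length : Int)
        + PySem.Dict.getD (graph.foldl (fun d kv =>
            (PySem.Set.ofList (pvLookup graph kv.1)).foldl
              (fun d v => PySem.Dict.insert d v (PySem.Dict.getD d v 0 + 1)) d) PySem.Dict.empty) n 0 := by
    intro n
    rw [getD_indeg, PySem.List.foldl_ite_add_one]
    simp
  by_cases hE : graph = []
  · subst hE; simp [PySem.List.min?]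
  · have hne : graph.isEmpty = false := by simp [hE]
    rw [hne]
    simp only [Bool.false_eq_true, if_false]
    have hmapeq : graph.map (fun kv : Int × List Int =>
        ((pvLookup graph kv.1).length : Int)
          + graph.foldl (fun c kv2 => if kv.1 ∈ pvLookup graph kv2.1 then c + 1 else c) 0)
      = graph.map (fun kv : Int × List Int =>
        ((pvLookup graph kv.1).length : Int)
          + PySem.Dict.getD (graph.foldl (fun d kv =>
              (PySem.Set.ofList (pvLookup graph kv.1)).foldl
                (fun d v => PySem.Dict.insert d v (PySem.Dict.getD d v 0 + 1)) d) PySem.Dict.empty) kv.1 0) :=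
      List.map_congr_left (fun kv _ => hdeg kv.1)
    rw [hmapeq]
    cases hm : PySem.List.min? (graph.map (fun kv : Int × List Int =>
        ((pvLookup graph kv.1).length : Int)
          + PySem.Dict.getD (graph.foldl (fun d kv =>
              (PySem.Set.ofList (pvLookup graph kv.1)).foldl
                (fun d v => PySem.Dict.insert d v (PySem.Dict.getD d v 0 + 1)) d) PySem.Dict.empty) kv.1 0)) (fun x => x) with
    | none => rfl
    | some m =>
      simp only
      rw [List.filter_map]
      apply congrArg (List.map Prod.fst)
      apply List.filter_congr
      intro kv _
      simp only [Function.comp]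
      rw [← hdeg kv.1]
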